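-- pv_equiv track=rewrite | github.com/MartenSkogh/QiskitVQEWrapper | vqe_wrapper/index_mapping.py | num_beta
-- ===== SOURCE A (Python) =====
-- def num_beta(n, N):
--     """
--     Counts the number of beta electrons in a Fock representation. Assumes that the orbitals are sorted by spin first.
--
--     :param n: any positive integer
--     :param N: number of bits/qubits used in representing the integer `n`
--     :returns: an integer giving the number of alpha electrons
--     """
--     upper_mask = (2 ** (N//2) - 1) << N//2
--     masked = (n & upper_mask)
--     counter = 0
--     indexer = 2 ** (N//2)
--     for i in range(N//2):
--         counter += bool(masked & indexer) # a bool is automatically cast to 1 or 0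
--         indexer = indexer << 1
--
--     return counter
-- ===== SOURCE B (Python) =====
-- def num_beta(n, N):
--     """Same count, but via Brian Kernighan's trick: repeatedly clear the
--     lowest set bit of the masked value instead of scanning all N//2 positions."""
--     masked = n & ((2 ** (N//2) - 1) << (N//2))
--     counter = 0
--     while masked:
--         masked &= masked - 1
--         counter += 1
--     return counter
-- ===== Notes on version B (the rewrite author's own statement) =====
-- stated objective: faster
-- what changed: Instead of scanning all N//2 mask positions with a sliding indexer, B counts the set bits of the masked value directly with Brian Kernighan's clear-lowest-bit loop, iterating only once per set bit.
import Mathlib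
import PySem

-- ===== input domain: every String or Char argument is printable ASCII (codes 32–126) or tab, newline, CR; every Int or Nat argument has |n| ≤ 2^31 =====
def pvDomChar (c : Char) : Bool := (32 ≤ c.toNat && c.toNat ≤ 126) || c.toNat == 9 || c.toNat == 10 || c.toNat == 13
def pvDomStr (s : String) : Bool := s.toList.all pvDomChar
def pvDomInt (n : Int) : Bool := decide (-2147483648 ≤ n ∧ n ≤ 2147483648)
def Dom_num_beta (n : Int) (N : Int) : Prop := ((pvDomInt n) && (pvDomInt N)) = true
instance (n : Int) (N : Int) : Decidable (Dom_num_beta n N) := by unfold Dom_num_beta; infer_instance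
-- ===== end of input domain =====

-- B replaces A's position-by-position scan (N//2 iterations with a sliding indexer) by
-- Brian Kernighan's clear-lowest-bit loop on the masked value: one iteration per set bit instead of N//2.

-- ===== PORT A =====
def num_beta (n : Int) (N : Int) : Int :=
  let upper_mask : Int := ((2:Int) ^ (PySem.Int.floordiv N 2).toNat - 1) <<< (PySem.Int.floordiv N 2).toNat
  let masked : Int := PySem.Int.band n upper_mask
  let res := (PySem.List.pyRange 0 (PySem.Int.floordiv N 2) 1).foldl
      (fun (st : Int × Int) _ =>
        (st.1 + (if PySem.Int.band masked st.2 ≠ 0 then (1:Int) else 0), st.2 <<< (1:Nat)))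
      (0, (2:Int) ^ (PySem.Int.floordiv N 2).toNat)
  res.1

-- ===== PORT B =====
-- Kernighan loop of Source B; the Python value `masked` is nonnegative, so it runs on Nat.
def kern (m : Nat) (counter : Nat) : Nat :=
  if h : m = 0 then counter else kern (m &&& (m - 1)) (counter + 1)
termination_by m
decreasing_by
  have h1 : m &&& (m - 1) ≤ m - 1 := Nat.and_le_right
  omega

def num_beta_alt (n : Int) (N : Int) : Int :=
  let upper_mask : Int := ((2:Int) ^ (PySem.Int.floordiv N 2).toNat - 1) <<< (PySem.Int.floordiv N 2).toNat
  let masked : Int := PySem.Int.band n upper_mask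
  (kern masked.toNat 0 : Int)

-- ===== PRECONDITION & SPEC =====
-- Python raises TypeError for N < 0 (2 ** (N//2) is a float there); both A and B raise.
def Pre_num_beta (n : Int) (N : Int) : Prop := 0 ≤ N
instance (n : Int) (N : Int) : Decidable (Pre_num_beta n N) := by unfold Pre_num_beta; infer_instance
def pvWitness_num_beta : Int × Int := (5, 4)

def Spec_num_beta (n : Int) (N : Int) (out : Int) : Prop := out = num_beta_alt n N
instance (n : Int) (N : Int) (out : Int) : Decidable (Spec_num_beta n N out) := by unfold Spec_num_beta; infer_instance

-- ===== CLAIM (what is proved, stated in full; the proofs are below) =====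
def Claim_equal_num_beta : Prop := ∀ (n : Int) (N : Int), Dom_num_beta n N → Pre_num_beta n N → Spec_num_beta n N (num_beta n N)

-- ===== LEMMAS AND PROOFS =====

-- bitCount is invariant under doubling
theorem pv_bc_double (x : Nat) : PySem.Int.bitCount ((2 * x : Nat) : Int) = PySem.Int.bitCount (x : Int) := by
  rcases Nat.eq_zero_or_pos x with hx | hx
  · subst hx; norm_num
  · rw [PySem.Int.bitCount_natCast (by omega : 0 < 2 * x)]
    simp [Nat.mul_div_cancel_left x (by norm_num : 0 < 2), Nat.mul_mod_right]

theorem pv_bc_shift (k x : Nat) : PySem.Int.bitCount ((2 ^ k * x : Nat) : Int) = PySem.Int.bitCount (x : Int) := by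
  induction k with
  | zero => simp
  | succ k ih =>
      have h : 2 ^ (k + 1) * x = 2 * (2 ^ k * x) := by ring
      rw [h, pv_bc_double, ih]

-- clearing the lowest set bit decrements the bit count
theorem pv_bc_land_pred (m : Nat) (h : m ≠ 0) :
    PySem.Int.bitCount ((m &&& (m - 1) : Nat) : Int) + 1 = PySem.Int.bitCount (m : Int) := by
  induction m using Nat.strong_induction_on with
  | _ m ih =>
    rcases Nat.even_or_odd m with ⟨a, ha⟩ | ⟨a, ha⟩
    · -- m = 2a, a ≠ 0
      have ha2 : m = 2 * a := by omega
      have hane : a ≠ 0 := by omega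
      have hland : m &&& (m - 1) = 2 * (a &&& (a - 1)) := by
        have e1 : m = Nat.bit false a := by simp [Nat.bit_val]; omega
        have e2 : m - 1 = Nat.bit true (a - 1) := by simp [Nat.bit_val]; omega
        rw [e2, e1, Nat.land_bit]
        simp [Nat.bit_val]
      have hIH := ih a (by omega) hane
      rw [hland, pv_bc_double, hIH, ha2, pv_bc_double]
    · -- m = 2a + 1
      have hland : m &&& (m - 1) = 2 * a := by
        have e1 : m = Nat.bit true a := by simp [Nat.bit_val]; omega
        have e2 : m - 1 = Nat.bit false a := by simp [Nat.bit_val]; omega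
        rw [e2, e1, Nat.land_bit]
        simp [Nat.bit_val, Nat.and_self]
      rw [hland, pv_bc_double, ha,
          PySem.Int.bitCount_natCast (by omega : 0 < 2 * a + 1)]
      have : (2 * a + 1) % 2 = 1 := by omega
      have hdiv : (2 * a + 1) / 2 = a := by omega
      rw [this, hdiv]; omega

theorem pv_kern_eq (m : Nat) : ∀ c : Nat, kern m c = c + PySem.Int.bitCount (m : Int) := by
  induction m using Nat.strong_induction_on with
  | _ m ih =>
    intro c
    rw [kern]
    split
    · rename_i h; subst h; simp [PySem.Int.bitCount_zero]
    · rename_i h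
      have hlt : m &&& (m - 1) < m :=
        Nat.lt_of_le_of_lt (Nat.and_le_right) (by omega)
      rw [ih _ hlt, ← pv_bc_land_pred m h]
      omega

-- a fold whose body ignores the list elements is an iterate of the step
theorem pv_foldl_ignore {σ : Type} (g : σ → σ) :
    ∀ (l : List Int) (st : σ), l.foldl (fun s _ => g s) st = g^[l.length] st := by
  intro l
  induction l with
  | nil => intro st; rfl
  | cons x xs ih =>
      intro st
      simp [List.foldl, ih, Function.iterate_succ_apply]

-- the step of A's loop, with the masked value fixed
def pv_stepA (M : Nat) (st : Int × Int) : Int × Int :=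
  (st.1 + (if PySem.Int.band (M : Int) st.2 ≠ 0 then (1:Int) else 0), st.2 <<< (1:Nat))

theorem pv_loop_count (M : Nat) :
    ∀ (j s : Nat) (c : Int), M / 2 ^ s < 2 ^ j →
      (pv_stepA M)^[j] (c, ((2 ^ s : Nat) : Int)) =
        (c + (PySem.Int.bitCount ((M / 2 ^ s : Nat) : Int) : Int), ((2 ^ (s + j) : Nat) : Int)) := by
  intro j
  induction j with
  | zero =>
      intro s c h
      have h0 : M / 2 ^ s = 0 := Nat.lt_one_iff.mp (by simpa using h)
      simp [h0, PySem.Int.bitCount_zero]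
  | succ j ih =>
      intro s c h
      rw [Function.iterate_succ_apply]
      have htb : M.testBit s = decide (M / 2 ^ s % 2 = 1) := by
        have h1 : M.testBit s = (M >>> s).testBit 0 := by
          simp
        rw [h1, Nat.shiftRight_eq_div_pow]
        rcases Nat.mod_two_eq_zero_or_one (M / 2 ^ s) with hp | hp <;>
          simp [Nat.testBit_zero, hp]
      have hstep : pv_stepA M (c, ((2 ^ s : Nat) : Int)) =
          (c + (if M.testBit s then (1:Int) else 0), ((2 ^ (s + 1) : Nat) : Int)) := by
        unfold pv_stepA
        dsimp only
        have hsh : (((2 ^ s : Nat) : Int)) <<< (1 : Nat) = ((2 ^ (s + 1) : Nat) : Int) := by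
          rw [Int.shiftLeft_eq]; push_cast; ring
        rw [PySem.Int.band_natCast M (2 ^ s), hsh, Nat.and_two_pow]
        cases hb : M.testBit s <;>
          simp
      rw [hstep]
      have hdd : M / 2 ^ (s + 1) = M / 2 ^ s / 2 := by
        rw [pow_succ, Nat.div_div_eq_div_mul]
      have hlt : M / 2 ^ (s + 1) < 2 ^ j := by
        rw [hdd]; have := Nat.pow_succ 2 j; omega
      rw [ih (s + 1) (c + (if M.testBit s then (1:Int) else 0)) hlt]
      rw [show s + 1 + j = s + (j + 1) from by omega]
      refine Prod.ext ?_ rfl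
      dsimp only
      rw [hdd]
      rcases Nat.eq_zero_or_pos (M / 2 ^ s) with hp0 | hp0
      · have hz : M / 2 ^ s / 2 = 0 := by omega
        simp [hp0, htb, PySem.Int.bitCount_zero]
      · rw [PySem.Int.bitCount_natCast hp0]
        by_cases hb : M / 2 ^ s % 2 = 1
        · simp only [htb, hb, decide_true, if_true]
          push_cast
          ring
        · have hb0 : M / 2 ^ s % 2 = 0 := by omega
          simp only [htb, hb0, Nat.zero_ne_one, decide_false]
          push_cast
          omega

-- 2^k divides x &&& u whenever it divides u
theorem pv_dvd_land (k x u : Nat) (hu : 2 ^ k ∣ u) : 2 ^ k ∣ (x &&& u) := by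
  apply Nat.dvd_of_mod_eq_zero
  apply Nat.eq_of_testBit_eq
  intro i
  rw [Nat.testBit_mod_two_pow, Nat.testBit_land, Nat.zero_testBit]
  obtain ⟨c, rfl⟩ := hu
  rcases lt_or_ge i k with hik | hik
  · have hcu : (2 ^ k * c).testBit i = false := by
      rw [mul_comm, ← Nat.shiftLeft_eq, Nat.testBit_shiftLeft]
      simp [Nat.not_le.mpr hik]
    simp [hcu]
  · simp [Nat.not_lt.mpr hik]

-- the masked value as a natural number: nonnegative, ≤ mask, and a multiple of 2^k
theorem pv_masked_facts (n : Int) (k : Nat) :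
    ∃ M : Nat, PySem.Int.band n (((2 ^ k - 1) * 2 ^ k : Nat) : Int) = (M : Int) ∧
      M ≤ (2 ^ k - 1) * 2 ^ k ∧ 2 ^ k ∣ M := by
  have hUdvd : 2 ^ k ∣ (2 ^ k - 1) * 2 ^ k := dvd_mul_left _ _
  have hU0 : (0:Int) ≤ (((2 ^ k - 1) * 2 ^ k : Nat) : Int) := Int.natCast_nonneg _
  by_cases hn : 0 ≤ n
  · refine ⟨n.toNat &&& ((2 ^ k - 1) * 2 ^ k), ?_, Nat.and_le_right, pv_dvd_land _ _ _ hUdvd⟩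
    unfold PySem.Int.band
    rw [if_pos hn, if_pos hU0, Int.toNat_natCast]
  · refine ⟨(2 ^ k - 1) * 2 ^ k - ((2 ^ k - 1) * 2 ^ k &&& (-n - 1).toNat), ?_, Nat.sub_le _ _, ?_⟩
    · unfold PySem.Int.band
      rw [if_neg hn, if_pos hU0, Int.toNat_natCast]
    · refine Nat.dvd_sub hUdvd ?_
      have := pv_dvd_land k (-n - 1).toNat ((2 ^ k - 1) * 2 ^ k) hUdvd
      rwa [Nat.land_comm] at this

theorem pv_main (n N : Int) (hN : 0 ≤ N) : num_beta n N = num_beta_alt n N := by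
  have hfd0 : (0:Int) ≤ PySem.Int.floordiv N 2 := by
    rw [PySem.Int.le_floordiv_iff_mul_le (by norm_num)]; omega
  set k : Nat := (PySem.Int.floordiv N 2).toNat with hk
  have hfd : PySem.Int.floordiv N 2 = (k : Int) := (Int.toNat_of_nonneg hfd0).symm
  have hmask : ((2:Int) ^ k - 1) <<< k = (((2 ^ k - 1) * 2 ^ k : Nat) : Int) := by
    rw [Int.shiftLeft_eq]
    push_cast [Nat.one_le_two_pow]
    ring
  obtain ⟨M, hM, hMle, hMdvd⟩ := pv_masked_facts n k
  have hMlt : M / 2 ^ k < 2 ^ k := by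
    have h1 : (2 ^ k - 1) * 2 ^ k < 2 ^ k * 2 ^ k :=
      (Nat.mul_lt_mul_right (Nat.two_pow_pos k)).mpr
        (by have := Nat.one_le_two_pow (n := k); omega)
    rw [Nat.div_lt_iff_lt_mul (Nat.two_pow_pos k)]
    calc M ≤ (2 ^ k - 1) * 2 ^ k := hMle
      _ < 2 ^ k * 2 ^ k := h1
  -- evaluate port A
  have hA : num_beta n N = (PySem.Int.bitCount ((M / 2 ^ k : Nat) : Int) : Int) := by
    unfold num_beta
    rw [hfd]
    simp only [Int.toNat_natCast, hmask, hM]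
    have hbody : (fun (st : Int × Int) (_ : Int) =>
        (st.1 + (if PySem.Int.band (M : Int) st.2 ≠ 0 then (1:Int) else 0), st.2 <<< (1:Nat))) =
        (fun (st : Int × Int) (_ : Int) => pv_stepA M st) := rfl
    rw [hbody, pv_foldl_ignore (pv_stepA M)]
    have hlen : (PySem.List.pyRange 0 (k : Int) 1).length = k := by
      rw [PySem.List.length_pyRange_one]; simp
    have hinit : ((2:Int) ^ k) = ((2 ^ k : Nat) : Int) := by push_cast; ring
    rw [hlen, hinit, pv_loop_count M k k 0 hMlt]
    simp
  -- evaluate port B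
  have hB : num_beta_alt n N = (PySem.Int.bitCount ((M / 2 ^ k : Nat) : Int) : Int) := by
    unfold num_beta_alt
    rw [hfd]
    simp only [Int.toNat_natCast, hmask, hM]
    obtain ⟨x, hx⟩ := hMdvd
    have hdiv : M / 2 ^ k = x := by
      rw [hx, Nat.mul_div_cancel_left _ (Nat.two_pow_pos k)]
    rw [pv_kern_eq, hdiv, hx, pv_bc_shift]
    simp
  rw [hA, hB]

-- ===== VERDICT (by name: the statement is the Claim_ definition above) =====
theorem num_beta_spec : Claim_equal_num_beta := by
  intro n N _ hPre
  unfold Spec_num_beta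
  exact pv_main n N hPre
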